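-- pv_equiv track=rewrite | github.com/SevLG/isONcorrect_syncmers | minimizer_syncmer_comparison.py | get_kmer_syncmers_window_exclusive
-- ===== SOURCE A (Python) =====
-- from collections import deque
--
-- def get_kmer_syncmers_window_exclusive(seq, k_size, s_size):
--     w = k_size - s_size
--
--     # get t, the position of s-mer
--     # t is chosen to be in the middle of k-mer for chosen syncmer
--     diff=k_size-s_size
--     if diff %2==0:
--         t=diff/2
--     else:
--         t=(diff+1)/2
--     t -= 1
--     syncmers = []
--     # get list of all s-mers in first k-mer
--     kmer_smers = deque([seq[i:i + s_size] for i in range(w + 1)])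
--     # we only want the first found syncmer, so we use syncmer_found to see if
--     # one has been found in a given window
--     syncmer_found = False
--     for i in range(len(seq) - k_size):
--         # keeping track of window index, 0 == new window
--         window_index = i % w
--         if window_index == 0:
--             syncmer_found = False
--         # add new syncmer to list if its smallest s-mer is at place t and
--         # another syncmer has not been added in this window
--         if list(kmer_smers).index(min(kmer_smers)) == t and not syncmer_found:
--             syncmers.append((seq[i:i+k_size], i))
--             syncmer_found = True
--         # move the window one step to the right by popping the leftmost
--         # s-mer and adding one to the right
--         kmer_smers.popleft()
--         kmer_smers.append(seq[i+k_size-s_size+1:i+k_size+1])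
--
--     return syncmers
-- ===== SOURCE B (Python) =====
-- from collections import deque
--
--
-- def get_kmer_syncmers_window_exclusive(seq, k_size, s_size):
--     # Monotonic deque of candidate s-mer START POSITIONS (newest at the left):
--     # their s-mers strictly increase toward the right, so the rightmost entry
--     # is the leftmost minimal s-mer of the current window.  This replaces A's
--     # per-position min+index rescan of all w+1 s-mers.
--     w = k_size - s_size
--     t = (w + 1) // 2 - 1  # same t as A's even/odd branches
--
--     def smer(p):
--         return seq[p:p + s_size]
--
--     dq = deque()
--
--     def push(j):
--         v = smer(j)
--         while dq and smer(dq[0]) > v: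
--             dq.popleft()
--         dq.appendleft(j)
--
--     for j in range(w + 1):
--         push(j)
--
--     syncmers = []
--     found = False
--     for i in range(len(seq) - k_size):
--         if i % w == 0:
--             found = False
--         if dq[-1] == i + t and not found:
--             syncmers.append((seq[i:i + k_size], i))
--             found = True
--         if dq[-1] == i:
--             dq.pop()
--         push(i + w + 1)
--     return syncmers
-- ===== Notes on version B (the rewrite author's own statement) =====
-- stated objective: faster
-- what changed: Replaces the per-position rescan of all w+1 s-mers (min + index over a list rebuilt from the deque) by a monotonic deque of candidate start positions that yields the leftmost-minimum s-mer of the sliding window in amortised O(1) comparisons per step.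
import Mathlib
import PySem

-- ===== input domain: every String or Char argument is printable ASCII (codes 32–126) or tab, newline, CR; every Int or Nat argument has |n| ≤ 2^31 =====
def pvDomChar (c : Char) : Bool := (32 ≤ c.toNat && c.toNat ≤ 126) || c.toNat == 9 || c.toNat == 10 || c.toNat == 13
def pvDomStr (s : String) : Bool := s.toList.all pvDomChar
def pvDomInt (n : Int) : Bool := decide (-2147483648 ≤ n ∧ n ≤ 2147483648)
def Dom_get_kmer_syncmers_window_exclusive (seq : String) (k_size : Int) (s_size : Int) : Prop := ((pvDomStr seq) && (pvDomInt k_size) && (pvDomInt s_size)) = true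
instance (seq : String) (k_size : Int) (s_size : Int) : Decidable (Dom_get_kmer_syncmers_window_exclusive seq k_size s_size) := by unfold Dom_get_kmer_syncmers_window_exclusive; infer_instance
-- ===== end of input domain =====

-- B replaces A's per-position rescan of all w+1 s-mers by a monotonic deque of
-- candidate positions holding the leftmost-minimum s-mer of the sliding window
-- (objective: faster).

-- ===== PORT A =====
-- loop body of A's main for-loop (the fold below applies it to each i of the range)
def pvStepA (seq : String) (k_size s_size w t : Int)
    (st : List String × Bool × List (String × Int)) (i : Int) :
    List String × Bool × List (String × Int) :=
  let ksm := st.1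
  let found := if PySem.Int.mod i w = 0 then false else st.2.1
  -- list(kmer_smers).index(min(kmer_smers)) == t; min of an empty deque raises
  -- ValueError (excluded by Pre_), ported as a false branch
  let hit : Bool :=
    match PySem.List.min? ksm (fun x => x) with
    | none => false
    | some mv => decide ((PySem.List.index? ksm mv).map (fun j => (j : Int)) = some t)
  let syn := if hit && !found then
      st.2.2 ++ [(PySem.Str.slice seq (some i) (some (i + k_size)), i)]
    else st.2.2
  let found' := if hit && !found then true else found
  (ksm.tail ++ [PySem.Str.slice seq (some (i + k_size - s_size + 1)) (some (i + k_size + 1))],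
   found', syn)

def get_kmer_syncmers_window_exclusive (seq : String) (k_size : Int) (s_size : Int) : List (String × Int) :=
  let w := k_size - s_size
  let diff := k_size - s_size
  -- Python's t is a float whose value is an exact integer half; ported as that Int
  let t : Int := (if PySem.Int.mod diff 2 = 0 then PySem.Int.floordiv diff 2
                  else PySem.Int.floordiv (diff + 1) 2) - 1
  let kmer_smers0 : List String :=
    (PySem.List.pyRange 0 (w + 1) 1).map (fun i => PySem.Str.slice seq (some i) (some (i + s_size)))
  let st := (PySem.List.pyRange 0 (PySem.Str.len seq - k_size) 1).foldl
    (pvStepA seq k_size s_size w t) (kmer_smers0, false, [])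
  st.2.2

-- ===== PORT B =====
-- smer(p) = seq[p:p+s_size]
def pvSmerB (seq : String) (s_size p : Int) : String :=
  PySem.Str.slice seq (some p) (some (p + s_size))

-- push(j): 'while dq and smer(dq[0]) > v: dq.popleft(); dq.appendleft(j)'
def pvPushB (seq : String) (s_size : Int) (dq : List Int) (j : Int) : List Int :=
  match dq with
  | [] => [j]
  | p :: rest =>
      if pvSmerB seq s_size j < pvSmerB seq s_size p then pvPushB seq s_size rest j
      else j :: p :: rest

-- 'for j in range(w + 1): push(j)' as recursion on the remaining iteration count
def pvInitB (seq : String) (s_size : Int) : Nat → Int → List Int → List Int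
  | 0, _, dq => dq
  | fuel + 1, j, dq => pvInitB seq s_size fuel (j + 1) (pvPushB seq s_size dq j)

-- the main for-loop as recursion on the remaining iteration count; the output
-- list is produced front-to-back by consing the current hit onto the rest
-- (dq[-1] on an empty deque raises IndexError, excluded by Pre_; getLast?.any
-- is false there)
def pvLoopB (seq : String) (k_size s_size w t : Int) :
    Nat → Int → List Int → Bool → List (String × Int)
  | 0, _, _, _ => []
  | fuel + 1, i, dq, found0 =>
    let found := if PySem.Int.mod i w = 0 then false else found0
    let hit : Bool := (dq.getLast?.any (fun p => p == i + t)) && !found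
    let dq1 := if dq.getLast? == some i then dq.dropLast else dq
    let dq2 := pvPushB seq s_size dq1 (i + w + 1)
    let rest := pvLoopB seq k_size s_size w t fuel (i + 1) dq2 (found || hit)
    if hit then (PySem.Str.slice seq (some i) (some (i + k_size)), i) :: rest else rest

def get_kmer_syncmers_window_exclusive_alt (seq : String) (k_size : Int) (s_size : Int) : List (String × Int) :=
  let w := k_size - s_size
  let t : Int := PySem.Int.floordiv (w + 1) 2 - 1
  let dq := pvInitB seq s_size (w + 1).toNat 0 []
  pvLoopB seq k_size s_size w t (PySem.Str.len seq - k_size).toNat 0 dq false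

-- ===== PRECONDITION & SPEC =====
-- Pre_ excludes exactly the inputs on which Python A raises: with w = k_size - s_size ≤ 0
-- and len(seq) > k_size the loop body hits ZeroDivisionError (i % 0, w = 0) or
-- ValueError (min of an empty deque, w < 0); everywhere else A returns.
def Pre_get_kmer_syncmers_window_exclusive (seq : String) (k_size : Int) (s_size : Int) : Prop :=
  1 ≤ k_size - s_size ∨ (PySem.Str.len seq ≤ k_size ∧ k_size - s_size ≤ 0)
instance (seq : String) (k_size : Int) (s_size : Int) : Decidable (Pre_get_kmer_syncmers_window_exclusive seq k_size s_size) := by unfold Pre_get_kmer_syncmers_window_exclusive; infer_instance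
def pvWitness_get_kmer_syncmers_window_exclusive : String × Int × Int := ("acgtacgt", 4, 2)

def Spec_get_kmer_syncmers_window_exclusive (seq : String) (k_size : Int) (s_size : Int) (out : List (String × Int)) : Prop := out = get_kmer_syncmers_window_exclusive_alt seq k_size s_size
instance (seq : String) (k_size : Int) (s_size : Int) (out : List (String × Int)) : Decidable (Spec_get_kmer_syncmers_window_exclusive seq k_size s_size out) := by unfold Spec_get_kmer_syncmers_window_exclusive; infer_instance

-- ===== CLAIM (what is proved, stated in full; the proofs are below) =====
def Claim_equal_get_kmer_syncmers_window_exclusive : Prop := ∀ (seq : String) (k_size : Int) (s_size : Int), Dom_get_kmer_syncmers_window_exclusive seq k_size s_size → Pre_get_kmer_syncmers_window_exclusive seq k_size s_size → Spec_get_kmer_syncmers_window_exclusive seq k_size s_size (get_kmer_syncmers_window_exclusive seq k_size s_size)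

-- ===== LEMMAS AND PROOFS =====

-- p is a candidate for window right-end hi: its s-mer is ≤ every later one before hi
def pvGood (f : Int → String) (hi p : Int) : Bool :=
  (PySem.List.pyRange p hi 1).all (fun q => decide (f p ≤ f q))

-- candidate positions of the window [lo, hi), in increasing order (the monotonic
-- deque of B, newest first, is exactly this list reversed)
def pvCand (f : Int → String) (lo hi : Int) : List Int :=
  (PySem.List.pyRange lo hi 1).filter (pvGood f hi)

-- pvPushB = cons after dropping the strictly-greater prefix
theorem pvPushB_eq_dropWhile (seq : String) (s_size : Int) (dq : List Int) (j : Int) :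
    pvPushB seq s_size dq j
      = j :: dq.dropWhile (fun p => decide (pvSmerB seq s_size j < pvSmerB seq s_size p)) := by
  induction dq with
  | nil => rfl
  | cons hd tl ih =>
    by_cases h : pvSmerB seq s_size j < pvSmerB seq s_size hd
    · simp [pvPushB, List.dropWhile, h, ih]
    · simp [pvPushB, List.dropWhile, h]

theorem dropWhile_eq_filter_of_mono {α : Type} (p : α → Bool) (l : List α)
    (h : l.Pairwise (fun a b => p b = true → p a = true)) :
    l.dropWhile p = l.filter (fun x => !p x) := by
  induction l with
  | nil => rfl
  | cons x t ih =>
    rcases List.pairwise_cons.mp h with ⟨hx, ht⟩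
    by_cases hp : p x = true
    · simp [List.dropWhile, List.filter, hp, ih ht]
    · have hall : ∀ y ∈ t, p y = false := by
        intro y hy
        by_contra hc
        exact hp (hx y hy (by simpa using hc))
      have hp' : p x = false := by simpa using hp
      have ht' : List.filter (fun x => !p x) t = t :=
        List.filter_eq_self.mpr (by intro y hy; simp [hall y hy])
      simp [List.dropWhile, List.filter, hp', ht']

theorem pvGood_self (f : Int → String) (hi : Int) : pvGood f (hi + 1) hi = true := by
  simp [pvGood, PySem.List.pyRange_one_singleton]

theorem pvCand_snoc (f : Int → String) (lo hi : Int) (h : lo ≤ hi) :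
    pvCand f lo (hi + 1) = (pvCand f lo hi).filter (fun p => decide (f p ≤ f hi)) ++ [hi] := by
  unfold pvCand
  rw [PySem.List.pyRange_one_succ_right h, List.filter_append, List.filter_filter]
  have h2 : List.filter (pvGood f (hi + 1)) [hi] = [hi] := by
    simp [pvGood_self]
  rw [h2]
  congr 1
  apply List.filter_congr
  intro p hp
  rw [PySem.List.mem_pyRange_one] at hp
  have hsp : PySem.List.pyRange p (hi + 1) 1 = PySem.List.pyRange p hi 1 ++ [hi] :=
    PySem.List.pyRange_one_succ_right (by omega)
  simp only [pvGood, hsp, List.all_append, List.all_cons, List.all_nil, Bool.and_true]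
  exact Bool.and_comm _ _

theorem pvCand_pairwise_lt (f : Int → String) (lo hi : Int) :
    (pvCand f lo hi).Pairwise (· < ·) := by
  exact (PySem.List.pairwise_lt_pyRange_one lo hi).sublist List.filter_sublist

theorem mem_pvCand (f : Int → String) (lo hi p : Int) :
    p ∈ pvCand f lo hi ↔ (lo ≤ p ∧ p < hi) ∧ pvGood f hi p = true := by
  simp [pvCand, List.mem_filter, PySem.List.mem_pyRange_one]

theorem pvGood_le (f : Int → String) (hi p q : Int) (hg : pvGood f hi p = true)
    (h1 : p ≤ q) (h2 : q < hi) : f p ≤ f q := by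
  simp only [pvGood, List.all_eq_true] at hg
  simpa using hg q (by rw [PySem.List.mem_pyRange_one]; omega)

theorem pvCand_le_of_lt (f : Int → String) (lo hi a b : Int)
    (ha : a ∈ pvCand f lo hi) (hb : b ∈ pvCand f lo hi) (hab : a ≤ b) : f a ≤ f b := by
  rw [mem_pvCand] at ha hb
  exact pvGood_le f hi a b ha.2 hab hb.1.2

-- pushing position hi onto the deque for window [lo, hi) gives the deque for [lo, hi+1)
theorem pvPushB_cand (seq : String) (s_size : Int) (lo hi : Int) (h : lo ≤ hi) :
    pvPushB seq s_size ((pvCand (pvSmerB seq s_size) lo hi).reverse) hi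
      = (pvCand (pvSmerB seq s_size) lo (hi + 1)).reverse := by
  set f := pvSmerB seq s_size with hf
  rw [pvPushB_eq_dropWhile, pvCand_snoc f lo hi h, List.reverse_append]
  simp only [List.reverse_cons, List.reverse_nil, List.nil_append, List.singleton_append]
  congr 1
  have hmono : (pvCand f lo hi).reverse.Pairwise
      (fun a b => (decide (f hi < f b) = true) → (decide (f hi < f a) = true)) := by
    rw [List.pairwise_reverse]
    have h1 := (List.Pairwise.and_mem.mp (pvCand_pairwise_lt f lo hi))
    refine h1.imp ?_
    rintro a b ⟨hma, hmb, hab⟩ hpa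
    simp only [decide_eq_true_eq] at hpa ⊢
    exact lt_of_lt_of_le hpa (pvCand_le_of_lt f lo hi a b hma hmb hab.le)
  rw [dropWhile_eq_filter_of_mono _ _ hmono, List.filter_reverse]
  congr 1
  apply List.filter_congr
  intro q hq
  rw [← decide_not]
  simp

-- pvCand as a cons at the left end
theorem pvCand_cons (f : Int → String) (lo hi : Int) (h : lo < hi) :
    pvCand f lo hi = if pvGood f hi lo then lo :: pvCand f (lo + 1) hi else pvCand f (lo + 1) hi := by
  unfold pvCand
  rw [PySem.List.pyRange_one_cons h, List.filter_cons]

theorem pvCand_ne_nil (f : Int → String) (lo hi : Int) (h : lo < hi) :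
    pvCand f lo hi ≠ [] := by
  have hmem : hi - 1 ∈ pvCand f lo hi := by
    rw [mem_pvCand]
    refine ⟨⟨by omega, by omega⟩, ?_⟩
    have e : PySem.List.pyRange (hi - 1) hi 1 = [hi - 1] := by
      have h1 := PySem.List.pyRange_one_singleton (hi - 1)
      rw [show hi - 1 + 1 = hi by omega] at h1
      exact h1
    rw [pvGood, e]
    simp
  exact List.ne_nil_of_mem hmem

-- the head of pvCand is the leftmost position of a minimal s-mer of the window
theorem pvCand_head_lma (f : Int → String) (lo hi : Int) (h : lo < hi) :
    ∃ c rest, pvCand f lo hi = c :: rest ∧ lo ≤ c ∧ c < hi ∧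
      (∀ q, c ≤ q → q < hi → f c ≤ f q) ∧ (∀ q, lo ≤ q → q < c → f c < f q) := by
  obtain ⟨c, rest, hc⟩ := List.exists_cons_of_ne_nil (pvCand_ne_nil f lo hi h)
  have hcm : c ∈ pvCand f lo hi := by rw [hc]; exact List.mem_cons_self ..
  rw [mem_pvCand] at hcm
  obtain ⟨⟨hlo, hhi⟩, hgood⟩ := hcm
  have hmin : ∀ q, c ≤ q → q < hi → f c ≤ f q := fun q h1 h2 => pvGood_le f hi c q hgood h1 h2
  have hrest : ∀ x ∈ rest, c < x := by
    have hp := pvCand_pairwise_lt f lo hi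
    rw [hc, List.pairwise_cons] at hp
    exact hp.1
  have hnotmem : ∀ q, q < c → q ∉ pvCand f lo hi := by
    intro q hq hmem
    rw [hc, List.mem_cons] at hmem
    rcases hmem with rfl | hmem
    · omega
    · exact absurd (hrest q hmem) (by omega)
  have hex : ∀ q, lo ≤ q → q < c → ∃ r, q < r ∧ r < hi ∧ f r < f q := by
    intro q h1 h2
    have hng : ¬ (pvGood f hi q = true) := by
      intro hg
      exact hnotmem q h2 (by rw [mem_pvCand]; exact ⟨⟨h1, by omega⟩, hg⟩)
    simp only [pvGood, List.all_eq_true, decide_eq_true_eq] at hng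
    rw [not_forall] at hng
    obtain ⟨r, hr0⟩ := hng
    rw [Classical.not_imp, not_le] at hr0
    have hng : ∃ r, r ∈ PySem.List.pyRange q hi 1 ∧ f r < f q := ⟨r, hr0.1, hr0.2⟩
    obtain ⟨r, hrmem, hr⟩ := hng
    rw [PySem.List.mem_pyRange_one] at hrmem
    have hlt : f r < f q := hr
    have hne : q ≠ r := fun e => absurd hlt (by rw [e]; exact lt_irrefl _)
    exact ⟨r, lt_of_le_of_ne hrmem.1 hne, hrmem.2, hlt⟩
  have hstrict : ∀ d : Nat, ∀ q, lo ≤ q → q < c → (c - q).toNat ≤ d → f c < f q := by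
    intro d
    induction d with
    | zero => intro q h1 h2 h3; omega
    | succ d ih =>
      intro q h1 h2 h3
      obtain ⟨r, hqr, hrhi, hfr⟩ := hex q h1 h2
      rcases le_or_gt c r with hcr | hrc
      · exact lt_of_le_of_lt (hmin r hcr hrhi) hfr
      · exact lt_trans (ih r (by omega) hrc (by omega)) hfr
  exact ⟨c, rest, hc, hlo, hhi, hmin, fun q h1 h2 => hstrict (c - q).toNat q h1 h2 le_rfl⟩

theorem pvT_eq (d : Int) :
    (if PySem.Int.mod d 2 = 0 then PySem.Int.floordiv d 2 else PySem.Int.floordiv (d + 1) 2)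
      = PySem.Int.floordiv (d + 1) 2 := by
  rcases eq_or_ne (PySem.Int.mod d 2) 0 with h | h
  · rw [if_pos h]
    rw [PySem.Int.mod_eq_emod_of_pos (by norm_num : (0:Int) < 2)] at h
    rw [PySem.Int.floordiv_eq_ediv_of_pos (by norm_num : (0:Int) < 2),
        PySem.Int.floordiv_eq_ediv_of_pos (by norm_num : (0:Int) < 2)]
    omega
  · rw [if_neg h]

-- A's per-window test (index of the first minimal s-mer = t), for c the
-- leftmost minimal position of the window [m, hi), equals 'c - m = t'
theorem pvHit_eq (f : Int → String) (m hi t c : Int) (h : m < hi)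
    (hlo : m ≤ c) (hhi : c < hi)
    (hmin : ∀ q, c ≤ q → q < hi → f c ≤ f q) (hstrict : ∀ q, m ≤ q → q < c → f c < f q) :
    (match PySem.List.min? ((PySem.List.pyRange m hi 1).map f) (fun x => x) with
     | none => false
     | some mv => decide ((PySem.List.index? ((PySem.List.pyRange m hi 1).map f) mv).map
         (fun j => (j : Int)) = some t))
    = decide (c - m = t) := by
  set l := (PySem.List.pyRange m hi 1).map f with hldef
  have hlen : l.length = (hi - m).toNat := by
    simp [hldef, PySem.List.length_pyRange_one]
  have hgetf : ∀ (i : Nat) (hI : i < l.length), l[i] = f (m + (i : Int)) := by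
    intro i hI
    have hI' : i < (PySem.List.pyRange m hi 1).length := by
      simpa [hldef] using hI
    simp only [hldef, List.getElem_map]
    rw [PySem.List.getElem_pyRange_one m hi i hI']
  rcases hmv : PySem.List.min? l (fun x => x) with _ | mv
  · exfalso
    have := (PySem.List.min?_eq_none_iff l (fun x => x)).mp hmv
    rw [this] at hlen
    simp at hlen
    omega
  · have hmem := PySem.List.min?_mem hmv
    have hsome : (PySem.List.index? l mv).isSome := (PySem.List.index?_isSome_iff l mv).mpr hmem
    obtain ⟨j, hj⟩ := Option.isSome_iff_exists.mp hsome
    obtain ⟨hjlen, hlj, hfirst⟩ := PySem.List.getElem_of_index?_eq_some hj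
    have hminall : ∀ y ∈ l, mv ≤ y := by
      intro y hy
      simpa using PySem.List.min?_isMin hmv y hy
    have hfmj : f (m + (j : Int)) = mv := by rw [← hlj, hgetf j hjlen]
    have hmj_hi : m + (j : Int) < hi := by
      have : j < (hi - m).toNat := by omega
      omega
    have hjc : c = m + (j : Int) := by
      rcases lt_trichotomy c (m + (j : Int)) with hlt | heq | hgt
      · exfalso
        have hIl : (c - m).toNat < l.length := by omega
        have hidx : (c - m).toNat < j := by omega
        have hfc : l[(c - m).toNat] = f c := by
          rw [hgetf _ hIl]; congr 1; omega
        have hne := hfirst _ hidx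
        have hge := hminall _ (l.getElem_mem hIl)
        rw [hfc] at hne hge
        have hle := hmin (m + (j : Int)) (le_of_lt hlt) hmj_hi
        rw [hfmj] at hle
        exact hne (le_antisymm hle hge)
      · exact heq
      · exfalso
        have hs := hstrict (m + (j : Int)) (by omega) hgt
        rw [hfmj] at hs
        have hIl : (c - m).toNat < l.length := by omega
        have hfc : l[(c - m).toNat] = f c := by
          rw [hgetf _ hIl]; congr 1; omega
        have hge := hminall _ (l.getElem_mem hIl)
        rw [hfc] at hge
        exact absurd hs (not_lt.mpr hge)
    simp only [hj]
    refine decide_eq_decide.mpr ?_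
    constructor
    · intro e
      have : ((j : Int)) = t := by simpa using e
      omega
    · intro e
      have : ((j : Int)) = t := by omega
      simp [this]

-- one A-iteration from the canonical window state, characterised
theorem pvStepA_char (seq : String) (k s w t m : Int) (hw : 1 ≤ w) (hk : w = k - s)
    (fo : Bool) (sy : List (String × Int)) :
    ∃ c rest, pvCand (pvSmerB seq s) m (m + w + 1) = c :: rest ∧
      pvStepA seq k s w t ((PySem.List.pyRange m (m + w + 1) 1).map (pvSmerB seq s), fo, sy) m
        = ((PySem.List.pyRange (m + 1) (m + 1 + w + 1) 1).map (pvSmerB seq s),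
           (if PySem.Int.mod m w = 0 then false else fo) ||
             (decide (c - m = t) && !(if PySem.Int.mod m w = 0 then false else fo)),
           sy ++ (if decide (c - m = t) && !(if PySem.Int.mod m w = 0 then false else fo)
              then [(PySem.Str.slice seq (some m) (some (m + k)), m)] else [])) := by
  set f := pvSmerB seq s with hf
  have hmhi : m < m + w + 1 := by omega
  obtain ⟨c, rest, hc, hclo, hchi, hcmin, hcstrict⟩ := pvCand_head_lma f m (m + w + 1) hmhi
  have hhit := pvHit_eq f m (m + w + 1) t c hmhi hclo hchi hcmin hcstrict
  refine ⟨c, rest, hc, ?_⟩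
  set fd := (if PySem.Int.mod m w = 0 then false else fo) with hfd
  simp only [pvStepA, ← hfd, hhit]
  refine Prod.ext ?_ (Prod.ext ?_ ?_)
  · show _ = _
    rw [PySem.List.pyRange_one_cons hmhi]
    simp only [List.map_cons, List.tail_cons]
    have e1 : PySem.Str.slice seq (some (m + k - s + 1)) (some (m + k + 1)) = f (m + w + 1) := by
      rw [show m + k - s + 1 = m + w + 1 from by omega,
          show m + k + 1 = (m + w + 1) + s from by omega, hf]
      rfl
    rw [e1, show m + 1 + w + 1 = (m + w + 1) + 1 from by omega,
        PySem.List.pyRange_one_succ_right (by omega : m + 1 ≤ m + w + 1)]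
    simp
  · show (if decide (c - m = t) && !fd then true else fd) = _
    cases hd : (decide (c - m = t) && !fd) <;> cases fd <;> simp_all
  · show (if decide (c - m = t) && !fd then sy ++ _ else sy) = _
    cases hd : (decide (c - m = t) && !fd) <;> simp

-- one deque-advance: pop the leaving position, push the entering one
theorem pvDqStep (seq : String) (s m w : Int) (hw : 1 ≤ w) :
    pvPushB seq s
      (if ((pvCand (pvSmerB seq s) m (m + w + 1)).reverse).getLast? == some m
       then ((pvCand (pvSmerB seq s) m (m + w + 1)).reverse).dropLast
       else (pvCand (pvSmerB seq s) m (m + w + 1)).reverse)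
      (m + w + 1)
    = (pvCand (pvSmerB seq s) (m + 1) (m + 1 + w + 1)).reverse := by
  set f := pvSmerB seq s with hf
  have hmhi : m < m + w + 1 := by omega
  obtain ⟨c, rest, hc, hclo, hchi, hcmin, hcstrict⟩ := pvCand_head_lma f m (m + w + 1) hmhi
  have hlast : ((pvCand f m (m + w + 1)).reverse).getLast? = some c := by
    rw [hc]; simp
  have hpop : (if ((pvCand f m (m + w + 1)).reverse).getLast? == some m
       then ((pvCand f m (m + w + 1)).reverse).dropLast
       else (pvCand f m (m + w + 1)).reverse)
      = (pvCand f (m + 1) (m + w + 1)).reverse := by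
    rw [hlast]
    by_cases hcm : c = m
    · have hgm : pvGood f (m + w + 1) m = true := by
        have h1 := (mem_pvCand f m (m + w + 1) c).mp (by rw [hc]; exact List.mem_cons_self ..)
        rw [hcm] at h1
        exact h1.2
      have hcons := pvCand_cons f m (m + w + 1) hmhi
      rw [if_pos hgm] at hcons
      have he : c :: rest = m :: pvCand f (m + 1) (m + w + 1) := hc.symm.trans hcons
      have hrest' : rest = pvCand f (m + 1) (m + w + 1) := ((List.cons.injEq _ _ _ _).mp he).2
      rw [if_pos (by simp [hcm]), hc, hcm, hrest']
      simp only [List.reverse_cons]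
      exact List.dropLast_concat
    · have hgm : pvGood f (m + w + 1) m = false := by
        by_contra hg
        have hg' : pvGood f (m + w + 1) m = true := by simpa using hg
        have hcons := pvCand_cons f m (m + w + 1) hmhi
        rw [if_pos hg'] at hcons
        have he : c :: rest = m :: pvCand f (m + 1) (m + w + 1) := hc.symm.trans hcons
        exact hcm ((List.cons.injEq _ _ _ _).mp he).1
      have hcons := pvCand_cons f m (m + w + 1) hmhi
      rw [if_neg (by simp [hgm])] at hcons
      rw [if_neg (by simp [hcm]), hcons]
  rw [hpop, show m + 1 + w + 1 = (m + w + 1) + 1 from by omega]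
  exact pvPushB_cand seq s (m + 1) (m + w + 1) (by omega)

-- the init loop builds the candidate deque of the first window
theorem pvInitB_cand (seq : String) (s a : Int) :
    ∀ (fuel : Nat) (lo : Int), a ≤ lo →
    pvInitB seq s fuel lo ((pvCand (pvSmerB seq s) a lo).reverse)
      = (pvCand (pvSmerB seq s) a (lo + fuel)).reverse := by
  intro fuel
  induction fuel with
  | zero =>
    intro lo hal
    simp [pvInitB]
  | succ n ih =>
    intro lo hal
    show pvInitB seq s n (lo + 1) (pvPushB seq s ((pvCand (pvSmerB seq s) a lo).reverse) lo)
      = _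
    rw [pvPushB_cand seq s a lo hal, ih (lo + 1) (by omega),
        show lo + 1 + (n : Int) = lo + ((n : Nat) + 1 : Nat) from by push_cast; ring]

-- main lockstep lemma: A's fold and B's recursion produce the same output
theorem pvMain (seq : String) (k s w t : Int) (hw : 1 ≤ w) (hk : w = k - s) :
    ∀ (fuel : Nat) (m : Int) (fo : Bool) (sy : List (String × Int)),
    ((PySem.List.pyRange m (m + fuel) 1).foldl (pvStepA seq k s w t)
        ((PySem.List.pyRange m (m + w + 1) 1).map (pvSmerB seq s), fo, sy)).2.2
      = sy ++ pvLoopB seq k s w t fuel m ((pvCand (pvSmerB seq s) m (m + w + 1)).reverse) fo := by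
  intro fuel
  induction fuel with
  | zero =>
    intro m fo sy
    rw [show m + ((0 : Nat) : Int) = m from by push_cast; ring,
        PySem.List.pyRange_one_eq_nil le_rfl]
    simp [pvLoopB]
  | succ n ih =>
    intro m fo sy
    have hsplit : PySem.List.pyRange m (m + ((n : Nat) + 1 : Nat)) 1
        = m :: PySem.List.pyRange (m + 1) (m + 1 + (n : Nat)) 1 := by
      rw [show m + ((n : Nat) + 1 : Nat) = m + 1 + (n : Nat) from by push_cast; ring]
      exact PySem.List.pyRange_one_cons (by omega)
    rw [hsplit]
    simp only [List.foldl_cons]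
    obtain ⟨c, rest, hc, hstep⟩ := pvStepA_char seq k s w t m hw hk fo sy
    rw [hstep, ih (m + 1)]
    show _ = sy ++ pvLoopB seq k s w t (n + 1) m ((pvCand (pvSmerB seq s) m (m + w + 1)).reverse) fo
    have hlast : ((pvCand (pvSmerB seq s) m (m + w + 1)).reverse).getLast? = some c := by
      rw [hc]; simp
    have hdq := pvDqStep seq s m w hw
    rw [hlast] at hdq
    simp only [pvLoopB, hlast, Option.any_some, hdq]
    set fd := (if PySem.Int.mod m w = 0 then false else fo) with hfd
    have hbeq : ((c == m + t) : Bool) = decide (c - m = t) := by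
      refine Bool.eq_iff_iff.mpr ?_
      simp only [beq_iff_eq, decide_eq_true_eq]
      omega
    rw [hbeq]
    cases hcd : (decide (c - m = t) && !fd) with
    | false => simp
    | true => simp [List.append_assoc]

-- ===== VERDICT (by name: the statement is the Claim_ definition above) =====
theorem get_kmer_syncmers_window_exclusive_spec : Claim_equal_get_kmer_syncmers_window_exclusive := by
  unfold Claim_equal_get_kmer_syncmers_window_exclusive
  intro seq k s _ hpre
  unfold Spec_get_kmer_syncmers_window_exclusive
  simp only [get_kmer_syncmers_window_exclusive, get_kmer_syncmers_window_exclusive_alt, pvT_eq]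
  rcases le_or_gt (PySem.Str.len seq - k) 0 with hN | hN
  · rw [PySem.List.pyRange_one_eq_nil hN, show (PySem.Str.len seq - k).toNat = 0 from by omega]
    simp [pvLoopB]
  · have hw : 1 ≤ k - s := by
      rcases hpre with h | h
      · exact h
      · exfalso; omega
    rw [show (fun i => PySem.Str.slice seq (some i) (some (i + s))) = pvSmerB seq s from rfl]
    have hinit : pvInitB seq s (k - s + 1).toNat 0 []
        = (pvCand (pvSmerB seq s) 0 (k - s + 1)).reverse := by
      have h0 : ((pvCand (pvSmerB seq s) 0 0).reverse) = ([] : List Int) := by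
        simp [pvCand, PySem.List.pyRange_one_eq_nil (le_refl (0 : Int))]
      rw [← h0, pvInitB_cand seq s 0 (k - s + 1).toNat 0 le_rfl,
          show (0 : Int) + ((k - s + 1).toNat : Int) = k - s + 1 from by omega]
    rw [hinit]
    have h1 : (0 : Int) + ((PySem.Str.len seq - k).toNat : Int) = PySem.Str.len seq - k := by
      omega
    have hm := pvMain seq k s (k - s) (PySem.Int.floordiv (k - s + 1) 2 - 1) hw rfl
      (PySem.Str.len seq - k).toNat 0 false []
    rw [show (0 : Int) + (k - s) + 1 = k - s + 1 from by ring, h1] at hm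
    rw [hm]
    simp
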